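-- pv_equiv track=rewrite | github.com/HITOfficial/College | ASD/Dynamic Greedy/kintersect.py | kintersect
-- ===== SOURCE A (Python) =====
-- from  queue import PriorityQueue
--
-- def kintersect( A, k ):
--     n = len(A)
--     best_array = []
--     highest_difference = 0
--     for begining in range(n):
--         l, r = A[begining]
--         p_queue = PriorityQueue()
--         counter = 1
--         array = [begining]
--         difference = 0
--         for index,element in enumerate(A):
--             left, right = element
--             if left <= l and index != begining:
--                 # every element ending has highter value than begining, so to priority queue I'll add negative values of endings, and indexes to memorize
--                 # and also negative values, becous highest priority has the lowest value
--                 p_queue.put((-right,index))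
--
--         while not p_queue.empty() and counter < k:
--             _, index = p_queue.get()
--             counter += 1
--             array.append(index)
--
--         if k == counter:
--             # difference
--             difference =  min(A[array[-1]][1]-l,r-l)
--
--         if difference > highest_difference:
--             highest_difference = difference
--             best_array = array.copy()
--
--     return best_array
-- ===== SOURCE B (Python) =====
-- def kintersect(A, k):
--     # One pass computes only the best starting index via an order statistic on the
--     # sorted candidate right-endpoints; the winning index list is reconstructed once.
--     n = len(A)
--     best_i = -1
--     best_diff = 0
--     for i in range(n):
--         l, r = A[i]
--         rights = sorted(A[j][1] for j in range(n) if A[j][0] <= l and j != i)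
--         if k == 1:
--             diff = r - l
--         elif 2 <= k <= len(rights) + 1:
--             diff = min(rights[len(rights) - (k - 1)] - l, r - l)
--         else:
--             continue
--         if diff > best_diff:
--             best_diff = diff
--             best_i = i
--     if best_i == -1:
--         return []
--     l = A[best_i][0]
--     cands = sorted((-right, j) for j, (left, right) in enumerate(A) if left <= l and j != best_i)
--     return [best_i] + [j for _, j in cands[:k - 1]]
-- ===== Notes on version B (the rewrite author's own statement) =====
-- stated objective: faster
-- what changed: A builds a PriorityQueue and an index list for every start index and copies the best array on each improvement; B makes one pass that only tracks the best start index via an order statistic on the sorted candidate right-endpoints, then reconstructs the winning index list once at the end.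
import Mathlib
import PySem

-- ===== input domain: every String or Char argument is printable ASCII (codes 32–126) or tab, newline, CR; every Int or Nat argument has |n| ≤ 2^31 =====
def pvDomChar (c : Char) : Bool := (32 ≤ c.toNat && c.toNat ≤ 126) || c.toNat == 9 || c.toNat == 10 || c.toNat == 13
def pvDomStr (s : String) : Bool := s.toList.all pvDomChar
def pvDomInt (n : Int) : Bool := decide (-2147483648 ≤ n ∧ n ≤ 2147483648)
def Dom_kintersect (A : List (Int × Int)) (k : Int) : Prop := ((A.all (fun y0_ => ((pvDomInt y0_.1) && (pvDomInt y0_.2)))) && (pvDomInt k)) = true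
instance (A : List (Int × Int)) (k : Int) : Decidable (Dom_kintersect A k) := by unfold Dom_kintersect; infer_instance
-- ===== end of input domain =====

-- B replaces A's per-start priority queue and index-list building by a single pass that
-- only tracks the best start via an order statistic on the sorted candidate right-endpoints,
-- reconstructing the winning index list once at the end (objective: faster, constant factor).

-- ===== PORT A =====
-- The PriorityQueue is modeled exactly by keeping the queue as the sorted list of its
-- entries (Python tuple order on the (-right, index) pairs): put = ordered insert,
-- get = pop the head, i.e. extract-min — exact for PriorityQueue's semantics.
def pqLt (a b : Int × Int) : Bool := decide (a.1 < b.1) || (decide (a.1 = b.1) && decide (a.2 < b.2))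

def pqPut : List (Int × Int) → (Int × Int) → List (Int × Int)
  | [], x => [x]
  | y :: ys, x => if pqLt x y then x :: y :: ys else y :: pqPut ys x

-- the 'while not p_queue.empty() and counter < k' loop of A
def popLoop : List (Int × Int) → Int → Int → List Int → Int × List Int
  | [], c, _, arr => (c, arr)
  | x :: xs, c, k, arr => if c < k then popLoop xs (c + 1) k (arr ++ [x.2]) else (c, arr)

def kintersect (A : List (Int × Int)) (k : Int) : List Int :=
  ((PySem.List.enumerate A).foldl (fun st b =>
    let begining := b.1
    let l := b.2.1
    let r := b.2.2
    let p_queue := (PySem.List.enumerate A).foldl (fun q ie =>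
        if ie.2.1 ≤ l ∧ ie.1 ≠ begining then pqPut q (-ie.2.2, ie.1) else q) []
    let ca := popLoop p_queue 1 k [begining]
    let difference : Int := if k = ca.1 then
        min ((PySem.List.pyGetD A (PySem.List.pyGetD ca.2 (-1) 0) (0, 0)).2 - l) (r - l)
      else 0
    if st.1 < difference then (difference, ca.2) else st) ((0 : Int), ([] : List Int))).2

-- ===== PORT B =====
def kintersect_alt (A : List (Int × Int)) (k : Int) : List Int :=
  let e := PySem.List.enumerate A
  let bd := e.foldl (fun st p =>
    let i := p.1
    let l := p.2.1
    let r := p.2.2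
    let rights := PySem.List.sorted ((e.filter (fun q => decide (q.2.1 ≤ l) && decide (q.1 ≠ i))).map (fun q => q.2.2)) (fun x => x) false
    if k = 1 then
      let diff := r - l
      if st.1 < diff then (diff, i) else st
    else if 2 ≤ k ∧ k ≤ (rights.length : Int) + 1 then
      let diff := min (PySem.List.pyGetD rights ((rights.length : Int) - (k - 1)) 0 - l) (r - l)
      if st.1 < diff then (diff, i) else st
    else st) ((0 : Int), (-1 : Int))
  if bd.2 = -1 then []
  else
    let l := (PySem.List.pyGetD A bd.2 (0, 0)).1
    let cands := PySem.List.sorted2 (e.filterMap (fun q => if q.2.1 ≤ l ∧ q.1 ≠ bd.2 then some (-q.2.2, q.1) else none)) (fun x => x.1) (fun x => x.2) false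
    bd.2 :: (PySem.List.slice cands none (some (k - 1))).map (fun x => x.2)

-- ===== PRECONDITION & SPEC =====
def Spec_kintersect (A : List (Int × Int)) (k : Int) (out : List Int) : Prop := out = kintersect_alt A k
instance (A : List (Int × Int)) (k : Int) (out : List Int) : Decidable (Spec_kintersect A k out) := by unfold Spec_kintersect; infer_instance

-- ===== CLAIM (what is proved, stated in full; the proofs are below) =====
def Claim_equal_kintersect : Prop := ∀ (A : List (Int × Int)) (k : Int), Dom_kintersect A k → Spec_kintersect A k (kintersect A k)

-- ===== LEMMAS AND PROOFS =====

-- total order used by the priority queue / sorted2 (Python tuple order on (Int × Int))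
def lexLt (a b : Int × Int) : Bool := decide (a.1 < b.1) || (!decide (b.1 < a.1) && decide (a.2 < b.2))
def lexLe (a b : Int × Int) : Prop := a.1 < b.1 ∨ (a.1 = b.1 ∧ a.2 ≤ b.2)

-- candidate (-right, index) pairs for start index i with left endpoint l, and their sorted order
def csL (A : List (Int × Int)) (i l : Int) : List (Int × Int) :=
  (PySem.List.enumerate A).filterMap (fun q => if q.2.1 ≤ l ∧ q.1 ≠ i then some (-q.2.2, q.1) else none)
def SL (A : List (Int × Int)) (i l : Int) : List (Int × Int) :=
  PySem.List.sorted2 (csL A i l) (fun x => x.1) (fun x => x.2) false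

-- the two loop bodies, named
def stepA (A : List (Int × Int)) (k : Int) (st : Int × List Int) (b : Int × (Int × Int)) : Int × List Int :=
  let begining := b.1
  let l := b.2.1
  let r := b.2.2
  let p_queue := (PySem.List.enumerate A).foldl (fun q ie =>
      if ie.2.1 ≤ l ∧ ie.1 ≠ begining then pqPut q (-ie.2.2, ie.1) else q) []
  let ca := popLoop p_queue 1 k [begining]
  let difference : Int := if k = ca.1 then
      min ((PySem.List.pyGetD A (PySem.List.pyGetD ca.2 (-1) 0) (0, 0)).2 - l) (r - l)
    else 0
  if st.1 < difference then (difference, ca.2) else st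

def stepB (A : List (Int × Int)) (k : Int) (st : Int × Int) (p : Int × (Int × Int)) : Int × Int :=
  let i := p.1
  let l := p.2.1
  let r := p.2.2
  let rights := PySem.List.sorted (((PySem.List.enumerate A).filter (fun q => decide (q.2.1 ≤ l) && decide (q.1 ≠ i))).map (fun q => q.2.2)) (fun x => x) false
  if k = 1 then
    let diff := r - l
    if st.1 < diff then (diff, i) else st
  else if 2 ≤ k ∧ k ≤ (rights.length : Int) + 1 then
    let diff := min (PySem.List.pyGetD rights ((rights.length : Int) - (k - 1)) 0 - l) (r - l)
    if st.1 < diff then (diff, i) else st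
  else st

def reconB (A : List (Int × Int)) (k : Int) (bd : Int × Int) : List Int :=
  if bd.2 = -1 then []
  else
    let l := (PySem.List.pyGetD A bd.2 (0, 0)).1
    let cands := PySem.List.sorted2 ((PySem.List.enumerate A).filterMap (fun q => if q.2.1 ≤ l ∧ q.1 ≠ bd.2 then some (-q.2.2, q.1) else none)) (fun x => x.1) (fun x => x.2) false
    bd.2 :: (PySem.List.slice cands none (some (k - 1))).map (fun x => x.2)

def RelAB (A : List (Int × Int)) (k : Int) (stA : Int × List Int) (stB : Int × Int) : Prop :=
  stA.1 = stB.1 ∧ 0 ≤ stA.1 ∧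
    ((stB.2 = -1 ∧ stA.2 = []) ∨
     (∃ l r, (stB.2, (l, r)) ∈ PySem.List.enumerate A ∧ 1 ≤ k ∧
        stA.2 = stB.2 :: ((SL A stB.2 l).take (k - 1).toNat).map Prod.snd))

lemma kintersect_eq (A : List (Int × Int)) (k : Int) :
    kintersect A k = ((PySem.List.enumerate A).foldl (stepA A k) (0, [])).2 := rfl

lemma kintersect_alt_eq (A : List (Int × Int)) (k : Int) :
    kintersect_alt A k = reconB A k ((PySem.List.enumerate A).foldl (stepB A k) (0, -1)) := rfl

lemma pqLt_eq_lexLt (a b : Int × Int) : pqLt a b = lexLt a b := by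
  by_cases h1 : a.1 < b.1 <;> by_cases h2 : b.1 < a.1 <;> by_cases h3 : a.1 = b.1 <;>
    (simp [pqLt, lexLt, h1, h2, h3]; try omega)

lemma pqPut_eq_insertBy (q : List (Int × Int)) (x : Int × Int) :
    pqPut q x = PySem.List.insertBy lexLt x q := by
  induction q with
  | nil => simp [pqPut, PySem.List.insertBy]
  | cons y ys ih => simp [pqPut, PySem.List.insertBy, pqLt_eq_lexLt, ih]

lemma condFold (L : List (Int × (Int × Int))) (l i : Int) (acc : List (Int × Int)) :
    L.foldl (fun q ie => if ie.2.1 ≤ l ∧ ie.1 ≠ i then pqPut q (-ie.2.2, ie.1) else q) acc =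
      (L.filterMap (fun q => if q.2.1 ≤ l ∧ q.1 ≠ i then some (-q.2.2, q.1) else none)).foldl
        (fun q x => PySem.List.insertBy lexLt x q) acc := by
  induction L generalizing acc with
  | nil => rfl
  | cons a L ih =>
      by_cases h : a.2.1 ≤ l ∧ a.1 ≠ i
      · simp only [List.foldl_cons, List.filterMap_cons, if_pos h]
        rw [pqPut_eq_insertBy, ih]
      · simp only [List.foldl_cons, List.filterMap_cons, if_neg h]
        exact ih acc

lemma queue_eq (A : List (Int × Int)) (i l : Int) :
    (PySem.List.enumerate A).foldl (fun q ie =>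
        if ie.2.1 ≤ l ∧ ie.1 ≠ i then pqPut q (-ie.2.2, ie.1) else q) [] = SL A i l := by
  rw [condFold]
  rfl

lemma popLoop_eq (q : List (Int × Int)) (c k : Int) (arr : List Int) :
    popLoop q c k arr =
      (c + ((min (k - c).toNat q.length : Nat) : Int), arr ++ (q.take (k - c).toNat).map Prod.snd) := by
  induction q generalizing c arr with
  | nil => simp [popLoop]
  | cons x xs ih =>
      by_cases h : c < k
      · have hn : (k - c).toNat = (k - (c + 1)).toNat + 1 := by omega
        simp only [popLoop, if_pos h, ih, hn, List.take_succ_cons, List.length_cons, List.map_cons]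
        rw [Prod.mk.injEq]
        constructor
        · push_cast; omega
        · simp
      · have hn : (k - c).toNat = 0 := by omega
        simp [popLoop, h, hn]

lemma mem_enum (A : List (Int × Int)) (s i : Int) (x : Int × Int)
    (h : (i, x) ∈ PySem.List.enumerate A s) : ∃ n : Nat, i = s + n ∧ A[n]? = some x := by
  induction A generalizing s with
  | nil => simp [PySem.List.enumerate] at h
  | cons a A ih =>
      rw [PySem.List.enumerate_cons, List.mem_cons] at h
      rcases h with h | h
      · injection h with h1 h2
        exact ⟨0, by omega, by simp [h2]⟩
      · obtain ⟨n, hn, hx⟩ := ih (s + 1) h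
        exact ⟨n + 1, by omega, by simpa using hx⟩

lemma mem_enum_pyGetD (A : List (Int × Int)) (i : Int) (x : Int × Int)
    (h : (i, x) ∈ PySem.List.enumerate A) :
    0 ≤ i ∧ PySem.List.pyGetD A i (0, 0) = x := by
  obtain ⟨n, hn, hx⟩ := mem_enum A 0 i x h
  subst hn
  refine ⟨by omega, ?_⟩
  simp only [zero_add, PySem.List.pyGetD_natCast]
  simp [List.getD_eq_getElem?_getD, hx]

lemma lexLe_trans {a b c : Int × Int} (h1 : lexLe a b) (h2 : lexLe b c) : lexLe a c := by
  simp only [lexLe] at *; omega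

lemma lexLt_true_le {a b : Int × Int} (h : lexLt a b = true) : lexLe a b := by
  simp only [lexLt, lexLe, Bool.or_eq_true, Bool.and_eq_true, Bool.not_eq_true',
    decide_eq_true_eq, decide_eq_false_iff_not] at *
  omega

lemma lexLt_false_le {a b : Int × Int} (h : lexLt a b = false) : lexLe b a := by
  simp only [lexLt, lexLe, Bool.or_eq_false_iff, Bool.and_eq_false_iff, Bool.not_eq_false',
    decide_eq_true_eq, decide_eq_false_iff_not] at *
  omega

lemma insertBy_pairwise (x : Int × Int) (l : List (Int × Int)) (h : l.Pairwise lexLe) :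
    (PySem.List.insertBy lexLt x l).Pairwise lexLe := by
  induction l with
  | nil => simp [PySem.List.insertBy]
  | cons y ys ih =>
      rw [List.pairwise_cons] at h
      by_cases hb : lexLt x y = true
      · rw [show PySem.List.insertBy lexLt x (y :: ys) = x :: y :: ys by
          simp [PySem.List.insertBy, hb]]
        refine List.Pairwise.cons ?_ (List.Pairwise.cons h.1 h.2)
        intro z hz
        rcases List.mem_cons.mp hz with rfl | hz
        · exact lexLt_true_le hb
        · exact lexLe_trans (lexLt_true_le hb) (h.1 z hz)
      · rw [show PySem.List.insertBy lexLt x (y :: ys) = y :: PySem.List.insertBy lexLt x ys by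
          simp [PySem.List.insertBy, hb]]
        refine List.Pairwise.cons ?_ (ih h.2)
        intro z hz
        rcases (PySem.List.mem_insertBy lexLt x z ys).1 hz with rfl | hz
        · exact lexLt_false_le (by simpa using hb)
        · exact h.1 z hz

lemma foldl_insert_pairwise (L acc : List (Int × Int)) (hacc : acc.Pairwise lexLe) :
    (L.foldl (fun acc x => PySem.List.insertBy lexLt x acc) acc).Pairwise lexLe := by
  induction L generalizing acc with
  | nil => simpa
  | cons a L ih => exact ih _ (insertBy_pairwise a acc hacc)

lemma SL_pairwise (A : List (Int × Int)) (i l : Int) : (SL A i l).Pairwise lexLe := by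
  have h : SL A i l = (csL A i l).foldl (fun acc x => PySem.List.insertBy lexLt x acc) [] := rfl
  rw [h]
  exact foldl_insert_pairwise _ _ (by simp)

lemma SL_perm (A : List (Int × Int)) (i l : Int) : (SL A i l).Perm (csL A i l) :=
  PySem.List.sorted2_perm _ _ _ _

lemma filterMap_if (L : List (Int × (Int × Int))) (l i : Int) :
    L.filterMap (fun q => if q.2.1 ≤ l ∧ q.1 ≠ i then some ((-q.2.2, q.1) : Int × Int) else none) =
      (L.filter (fun q => decide (q.2.1 ≤ l) && decide (q.1 ≠ i))).map (fun q => (-q.2.2, q.1)) := by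
  induction L with
  | nil => rfl
  | cons a L ih => by_cases h : a.2.1 ≤ l ∧ a.1 ≠ i <;> simp_all

lemma csL_map_negfst (A : List (Int × Int)) (i l : Int) :
    (csL A i l).map (fun p => -p.1) =
      ((PySem.List.enumerate A).filter (fun q => decide (q.2.1 ≤ l) && decide (q.1 ≠ i))).map (fun q => q.2.2) := by
  unfold csL
  rw [filterMap_if]
  simp [List.map_map, Function.comp]

lemma rights_eq (A : List (Int × Int)) (i l : Int) :
    PySem.List.sorted ((csL A i l).map (fun p => -p.1)) (fun x => x) false =
      ((SL A i l).map (fun p => -p.1)).reverse := by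
  have p1 := PySem.List.sorted_perm ((csL A i l).map (fun p => -p.1)) (fun x => x) false
  have p2 : (((SL A i l).map (fun p => -p.1)).reverse).Perm ((csL A i l).map (fun p => -p.1)) :=
    (List.reverse_perm _).trans ((SL_perm A i l).map _)
  refine List.Perm.eq_of_pairwise (fun a b _ _ hab hba => le_antisymm hab hba) ?_ ?_
    (p1.trans p2.symm)
  · simpa using PySem.List.sorted_pairwise ((csL A i l).map (fun p => -p.1)) (fun x => x)
  · rw [List.pairwise_reverse, List.pairwise_map]
    exact (SL_pairwise A i l).imp (fun h => by simp only [lexLe] at h; simp; omega)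

lemma SL_mem_snd (A : List (Int × Int)) (i l : Int) (p : Int × Int) (hp : p ∈ SL A i l) :
    (PySem.List.pyGetD A p.2 (0, 0)).2 = -p.1 := by
  have hcs : p ∈ csL A i l := (SL_perm A i l).mem_iff.mp hp
  unfold csL at hcs
  rw [List.mem_filterMap] at hcs
  obtain ⟨q, hq, hsome⟩ := hcs
  by_cases hc : q.2.1 ≤ l ∧ q.1 ≠ i
  · rw [if_pos hc] at hsome
    injection hsome with h'
    subst h'
    have hg := (mem_enum_pyGetD A q.1 q.2 (by simpa using hq)).2
    simp [hg]
  · rw [if_neg hc] at hsome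
    cases hsome

lemma getE_congr {α : Type} (S : List α) (j1 j2 : Nat) (h1 : j1 < S.length)
    (h2 : j2 < S.length) (hj : j1 = j2) : S[j1]'h1 = S[j2]'h2 := by subst hj; rfl

lemma arr_last (S : List (Int × Int)) (i : Int) (n : Nat) (h1 : 1 ≤ n) (h2 : n ≤ S.length) :
    PySem.List.pyGetD (i :: (S.take n).map Prod.snd) (-1) 0 = (S[n - 1]'(by omega)).2 := by
  have hlen' : ((S.take n).map Prod.snd).length = n := by
    rw [List.length_map, List.length_take]; omega
  have ht : ((S.take n).map Prod.snd) ≠ [] := by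
    intro hnil; rw [hnil] at hlen'; simp at hlen'; omega
  rw [PySem.List.pyGetD_neg_one (i :: (S.take n).map Prod.snd) 0 (by simp)]
  rw [List.getLast_cons ht, List.getLast_eq_getElem]
  simp only [List.getElem_map, List.getElem_take, hlen']

lemma rights_get (S : List (Int × Int)) (k : Int) (h2 : 2 ≤ k) (hk : k ≤ (S.length : Int) + 1) :
    PySem.List.pyGetD ((S.map (fun p => -p.1)).reverse) ((S.length : Int) - (k - 1)) 0
      = -((S[(k - 1).toNat - 1]'(by omega)).1) := by
  rw [PySem.List.pyGetD_eq_getElem ((S.map (fun p => -p.1)).reverse) (0, 0).1 (by omega)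
    (by simp; omega)]
  rw [List.getElem_reverse, List.getElem_map]
  apply congrArg
  apply congrArg
  apply getE_congr
  simp only [List.length_map]
  omega

lemma upd_rel (A : List (Int × Int)) (k : Int) (i l r : Int) (arr : List Int) (d : Int)
    (hp : (i, (l, r)) ∈ PySem.List.enumerate A) (hk : 1 ≤ k)
    (harr : arr = i :: ((SL A i l).take (k - 1).toNat).map Prod.snd)
    (stA : Int × List Int) (stB : Int × Int) (h1 : stA.1 = stB.1) (h0 : 0 ≤ stA.1)
    (hrest : (stB.2 = -1 ∧ stA.2 = []) ∨
      (∃ l r, (stB.2, (l, r)) ∈ PySem.List.enumerate A ∧ 1 ≤ k ∧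
        stA.2 = stB.2 :: ((SL A stB.2 l).take (k - 1).toNat).map Prod.snd)) :
    RelAB A k (if stA.1 < d then (d, arr) else stA) (if stB.1 < d then (d, i) else stB) := by
  rw [h1]
  by_cases hup : stB.1 < d
  · rw [if_pos hup, if_pos hup]
    exact ⟨rfl, by omega, Or.inr ⟨l, r, hp, hk, harr⟩⟩
  · rw [if_neg hup, if_neg hup]
    exact ⟨h1, h0, hrest⟩

-- the per-element step preserves the relation
lemma step_rel (A : List (Int × Int)) (k : Int) (p : Int × (Int × Int))
    (hp : p ∈ PySem.List.enumerate A) (stA : Int × List Int) (stB : Int × Int)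
    (h : RelAB A k stA stB) : RelAB A k (stepA A k stA p) (stepB A k stB p) := by
  obtain ⟨i, l, r⟩ := p
  obtain ⟨h1, h0, hrest⟩ := h
  simp only [stepA, stepB]
  rw [queue_eq, popLoop_eq, ← csL_map_negfst, rights_eq]
  simp only [List.length_reverse, List.length_map]
  by_cases hk1 : k = 1
  · subst hk1
    simp only [sub_self, Int.toNat_zero, Nat.zero_min, List.take_zero, List.map_nil,
      List.append_nil, Nat.cast_zero, add_zero, if_true]
    have hsing : PySem.List.pyGetD ([i] : List Int) (-1) 0 = i := by simp [pysem]
    have hpg2 : (PySem.List.pyGetD A i (0, 0)).2 = r := by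
      rw [(mem_enum_pyGetD A i (l, r) hp).2]
    rw [hsing, hpg2, min_self]
    exact upd_rel A 1 i l r [i] (r - l) hp (by norm_num) (by simp) stA stB h1 h0 hrest
  · by_cases hk2 : 2 ≤ k ∧ k ≤ ((SL A i l).length : Int) + 1
    · obtain ⟨hb2, hkb⟩ := hk2
      have hn1 : 1 ≤ (k - 1).toNat := by omega
      have hnm : (k - 1).toNat ≤ (SL A i l).length := by omega
      have hc : k = 1 + ((min (k - 1).toNat (SL A i l).length : Nat) : Int) := by omega
      rw [if_neg hk1, if_pos (⟨hb2, hkb⟩ : 2 ≤ k ∧ k ≤ ((SL A i l).length : Int) + 1),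
        if_pos hc]
      simp only [List.singleton_append]
      rw [arr_last (SL A i l) i ((k - 1).toNat) hn1 hnm]
      rw [SL_mem_snd A i l ((SL A i l)[(k - 1).toNat - 1]'(by omega)) (List.getElem_mem _)]
      rw [rights_get (SL A i l) k hb2 hkb]
      exact upd_rel A k i l r _ _ hp (by omega) rfl stA stB h1 h0 hrest
    · have hcne : k ≠ 1 + ((min (k - 1).toNat (SL A i l).length : Nat) : Int) := by
        rcases not_and_or.mp hk2 with h | h <;> omega
      rw [if_neg hk1, if_neg hk2, if_neg hcne, if_neg (show ¬stA.1 < (0 : Int) by omega)]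
      exact ⟨h1, h0, hrest⟩

lemma fold_rel (A : List (Int × Int)) (k : Int) (L : List (Int × (Int × Int)))
    (hL : ∀ p ∈ L, p ∈ PySem.List.enumerate A) (stA : Int × List Int) (stB : Int × Int)
    (h : RelAB A k stA stB) : RelAB A k (L.foldl (stepA A k) stA) (L.foldl (stepB A k) stB) := by
  induction L generalizing stA stB with
  | nil => simpa using h
  | cons a L ih =>
      exact ih (fun p hp => hL p (List.mem_cons_of_mem a hp)) _ _
        (step_rel A k a (hL a List.mem_cons_self) stA stB h)

-- ===== VERDICT (by name: the statement is the Claim_ definition above) =====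
theorem kintersect_spec : Claim_equal_kintersect := by
  intro A k _
  unfold Spec_kintersect
  have h := fold_rel A k (PySem.List.enumerate A) (fun _ hp => hp) (0, []) (0, -1)
    ⟨rfl, le_refl 0, Or.inl ⟨rfl, rfl⟩⟩
  rw [kintersect_eq, kintersect_alt_eq]
  set stA := (PySem.List.enumerate A).foldl (stepA A k) (0, []) with hA
  set stB := (PySem.List.enumerate A).foldl (stepB A k) (0, -1) with hB
  obtain ⟨h1, h0, hrest⟩ := h
  rcases hrest with ⟨hb, ha⟩ | ⟨l, r, hmem, hk1, harr⟩
  · rw [reconB, if_pos hb, ha]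
  · have hne : stB.2 ≠ -1 := by
      obtain ⟨n, hn, -⟩ := mem_enum A 0 stB.2 (l, r) hmem
      omega
    have hget := (mem_enum_pyGetD A stB.2 (l, r) hmem).2
    rw [reconB, if_neg hne]
    simp only [hget]
    rw [show (k : Int) - 1 = (((k - 1).toNat : Nat) : Int) from by omega,
      PySem.List.slice_to_natCast]
    rw [harr]
    rfl
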